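-- pv_equiv track=rewrite | github.com/kagnlp/WebOperator | weboperator/action_generator.py | can_go_forward
-- ===== SOURCE A (Python) =====
-- from typing import List, Dict, Any, Optional
--
-- def can_go_forward(trajectory: List[Dict[str, Any]]) -> bool:
--     """Check if the agent can go forward in history."""
--     if len(trajectory) < 3:
--         return False
--     count = 0
--     for step in trajectory[:-1]:
--         if step["action"]["type"] == "go_back":
--             count += 1
--         elif step["action"]["type"] != "go_forward":
--             count -= 1
--     return count > 0
-- ===== SOURCE B (Python) =====
-- def can_go_forward(trajectory):
--     """Check if the agent can go forward in history."""
--     if len(trajectory) < 3: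
--         return False
--     return _net(trajectory, 0, len(trajectory) - 1) > 0
--
--
-- def _net(steps, lo, hi):
--     """Net back/forward balance of steps[lo:hi], by divide and conquer."""
--     if hi - lo == 0:
--         return 0
--     if hi - lo == 1:
--         t = steps[lo]["action"]["type"]
--         return 1 if t == "go_back" else 0 if t == "go_forward" else -1
--     mid = (lo + hi) // 2
--     return _net(steps, lo, mid) + _net(steps, mid, hi)
-- ===== Notes on version B (the rewrite author's own statement) =====
-- stated objective: alternative
-- what changed: Replaces the left-to-right branching accumulator loop over trajectory[:-1] with a divide-and-conquer recursion that splits the index range in half, computes the net back/forward balance of each half independently, and adds the two partial balances (logarithmic recursion depth instead of a linear scan with running state).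
import Mathlib
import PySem

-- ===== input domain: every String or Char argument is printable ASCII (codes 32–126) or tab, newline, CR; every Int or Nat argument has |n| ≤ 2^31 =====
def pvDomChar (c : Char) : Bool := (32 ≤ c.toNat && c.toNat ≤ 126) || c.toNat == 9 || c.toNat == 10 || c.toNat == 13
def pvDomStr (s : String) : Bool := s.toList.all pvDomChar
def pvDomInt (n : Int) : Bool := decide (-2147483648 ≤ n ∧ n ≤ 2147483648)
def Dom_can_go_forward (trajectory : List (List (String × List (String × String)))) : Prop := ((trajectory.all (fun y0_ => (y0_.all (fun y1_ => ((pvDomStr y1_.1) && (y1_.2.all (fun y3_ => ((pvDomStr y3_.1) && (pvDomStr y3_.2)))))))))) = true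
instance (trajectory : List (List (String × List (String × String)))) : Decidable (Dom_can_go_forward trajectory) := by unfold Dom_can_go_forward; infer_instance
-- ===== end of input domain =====

-- B replaces A's left-to-right accumulator loop by a divide-and-conquer balance over index
-- ranges (objective: alternative decomposition; return-value equivalence only).

-- shared helper: step["action"]["type"] as an Option (none = KeyError, excluded by Pre_)
def pvStepType? (step : List (String × List (String × String))) : Option String :=
  (PySem.Dict.get? (PySem.Dict.mk step) "action").bind
    (fun a => PySem.Dict.get? (PySem.Dict.mk a) "type")

-- ===== PORT A =====
-- A raises KeyError when a lookup fails; Pre_ excludes that, so getD "" is never the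
-- value actually used on admitted inputs.
def can_go_forward (trajectory : List (List (String × List (String × String)))) : Bool :=
  if trajectory.length < 3 then false
  else
    let count : Int := trajectory.dropLast.foldl (fun c step =>
      let ty := (pvStepType? step).getD ""
      if ty = "go_back" then c + 1
      else if ty ≠ "go_forward" then c - 1
      else c) 0
    decide (count > 0)

-- ===== PORT B =====
-- _net(steps, lo, hi): net balance of steps[lo:hi] by splitting the range at (lo+hi)//2
def pvNetDC (steps : List (List (String × List (String × String)))) (lo hi : Nat) : Int :=
  if hi - lo = 0 then 0
  else if hi - lo = 1 then
    let t := (pvStepType? ((PySem.List.pyGet? steps (lo : Int)).getD [])).getD ""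
    if t = "go_back" then 1 else if t = "go_forward" then 0 else -1
  else
    pvNetDC steps lo ((lo + hi) / 2) + pvNetDC steps ((lo + hi) / 2) hi
termination_by hi - lo
decreasing_by all_goals omega

def can_go_forward_alt (trajectory : List (List (String × List (String × String)))) : Bool :=
  if trajectory.length < 3 then false
  else decide (pvNetDC trajectory 0 (trajectory.length - 1) > 0)

-- ===== PRECONDITION & SPEC =====
-- Pre_ excludes exactly the inputs where A raises KeyError (a step before the last with
-- no "action" key or whose action has no "type" key) — only reachable when len ≥ 3.
def Pre_can_go_forward (trajectory : List (List (String × List (String × String)))) : Prop :=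
  trajectory.length < 3 ∨ ∀ step ∈ trajectory.dropLast, (pvStepType? step).isSome
instance (trajectory : List (List (String × List (String × String)))) : Decidable (Pre_can_go_forward trajectory) := by unfold Pre_can_go_forward; infer_instance

def pvWitness_can_go_forward : (List (List (String × List (String × String)))) :=
  [[("action", [("type", "go_back")])], [("action", [("type", "go_back")])], [("action", [("type", "stop")])]]

def Spec_can_go_forward (trajectory : List (List (String × List (String × String)))) (out : Bool) : Prop := out = can_go_forward_alt trajectory
instance (trajectory : List (List (String × List (String × String)))) (out : Bool) : Decidable (Spec_can_go_forward trajectory out) := by unfold Spec_can_go_forward; infer_instance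

-- ===== CLAIM (what is proved, stated in full; the proofs are below) =====
def Claim_equal_can_go_forward : Prop := ∀ (trajectory : List (List (String × List (String × String)))), Dom_can_go_forward trajectory → Pre_can_go_forward trajectory → Spec_can_go_forward trajectory (can_go_forward trajectory)

-- ===== LEMMAS AND PROOFS =====

-- per-step contribution, shared by both characterisations
def pvDelta (step : List (String × List (String × String))) : Int :=
  let t := (pvStepType? step).getD ""
  if t = "go_back" then 1 else if t = "go_forward" then 0 else -1

-- A's accumulator is the sum of the per-step contributions
theorem pvFoldlA (l : List (List (String × List (String × String)))) (c : Int) :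
    l.foldl (fun c step =>
      let ty := (pvStepType? step).getD ""
      if ty = "go_back" then c + 1
      else if ty ≠ "go_forward" then c - 1
      else c) c
    = c + (l.map pvDelta).sum := by
  induction l generalizing c with
  | nil => simp
  | cons s l ih =>
    simp only [List.foldl_cons, List.map_cons, List.sum_cons, ih, pvDelta]
    by_cases h1 : (pvStepType? s).getD "" = "go_back" <;>
      by_cases h2 : (pvStepType? s).getD "" = "go_forward" <;>
        simp [h1, h2] <;> omega

-- B's divide-and-conquer balance is the same sum over the index range
theorem pvNetDC_sum (steps : List (List (String × List (String × String)))) :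
    ∀ d lo hi, hi - lo = d → lo ≤ hi → hi ≤ steps.length →
    pvNetDC steps lo hi = (((steps.drop lo).take (hi - lo)).map pvDelta).sum := by
  intro d
  induction d using Nat.strong_induction_on with
  | _ d ih =>
    intro lo hi hd hle hlen
    rw [pvNetDC]
    by_cases h0 : hi - lo = 0
    · rw [if_pos h0, h0]; simp
    · by_cases h1 : hi - lo = 1
      · rw [if_neg h0, if_pos h1]
        have hlt : lo < steps.length := by omega
        have hget : PySem.List.pyGet? steps (lo : Int) = some steps[lo] := by
          simp [hlt]
        rw [h1, List.drop_eq_getElem_cons hlt]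
        have hrhs : (List.map pvDelta (List.take 1 (steps[lo] :: List.drop (lo + 1) steps))).sum
            = pvDelta steps[lo] := by
          rw [show List.take 1 (steps[lo] :: List.drop (lo + 1) steps) = [steps[lo]] from rfl]
          simp only [List.map_cons, List.map_nil, List.sum_cons, List.sum_nil, add_zero]
        rw [hrhs]
        simp [pvDelta, hget]
      · rw [if_neg h0, if_neg h1]
        rw [ih ((lo + hi) / 2 - lo) (by omega) lo ((lo + hi) / 2) rfl (by omega) (by omega),
            ih (hi - (lo + hi) / 2) (by omega) ((lo + hi) / 2) hi rfl (by omega) hlen,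
            show hi - lo = ((lo + hi) / 2 - lo) + (hi - (lo + hi) / 2) by omega,
            List.take_add, List.map_append, List.sum_append]
        have hdd : lo + ((lo + hi) / 2 - lo) = (lo + hi) / 2 := by omega
        rw [List.drop_drop, hdd]

-- ===== VERDICT (by name: the statement is the Claim_ definition above) =====

theorem can_go_forward_spec : Claim_equal_can_go_forward := by
  intro trajectory _ _
  unfold Spec_can_go_forward can_go_forward can_go_forward_alt
  by_cases hlen : trajectory.length < 3
  · simp [hlen]
  · simp only [hlen, if_false]
    rw [pvFoldlA, pvNetDC_sum trajectory _ 0 (trajectory.length - 1) rfl (by omega) (by omega)]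
    rw [List.drop_zero, Nat.sub_zero, ← List.dropLast_eq_take]
    simp
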